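-- pv_equiv track=rewrite | github.com/xn4224nx/Advent-of-Code-Py | 2017/Day 04/main.py | str_2_letter_dict
-- ===== SOURCE A (Python) =====
-- def str_2_letter_dict(pass_str: str) -> str:
--     """Transform a string into a dict of the letter to its count in the str."""
--
--     res_dict = {}
--
--     for char in pass_str:
--         if char in res_dict:
--             res_dict[char] += 1
--         else:
--             res_dict[char] = 1
--
--     # Create str representation of the dict
--     ret_str = ""
--
--     for char in sorted(res_dict):
--         ret_str += str(char) + str(res_dict[char])
--
--     return ret_str
-- ===== SOURCE B (Python) =====
-- def str_2_letter_dict(pass_str: str) -> str: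
--     """Sort the characters, then emit each run as <char><run length> in one pass.
--     No dict is built: sorting makes equal characters adjacent, so one grouping
--     scan yields both the sorted order and the counts."""
--     chars = sorted(pass_str)
--     parts = []
--     i = 0
--     while i < len(chars):
--         j = i + 1
--         while j < len(chars) and chars[j] == chars[i]:
--             j += 1
--         parts.append(chars[i] + str(j - i))
--         i = j
--     return "".join(parts)
-- ===== Notes on version B (the rewrite author's own statement) =====
-- stated objective: alternative
-- what changed: Replaces the dict-counting pass plus sorted-keys pass by sort-then-group: sort the characters once and emit each adjacent run as char+runlength in a single scan, with no dict at all.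
import Mathlib
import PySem

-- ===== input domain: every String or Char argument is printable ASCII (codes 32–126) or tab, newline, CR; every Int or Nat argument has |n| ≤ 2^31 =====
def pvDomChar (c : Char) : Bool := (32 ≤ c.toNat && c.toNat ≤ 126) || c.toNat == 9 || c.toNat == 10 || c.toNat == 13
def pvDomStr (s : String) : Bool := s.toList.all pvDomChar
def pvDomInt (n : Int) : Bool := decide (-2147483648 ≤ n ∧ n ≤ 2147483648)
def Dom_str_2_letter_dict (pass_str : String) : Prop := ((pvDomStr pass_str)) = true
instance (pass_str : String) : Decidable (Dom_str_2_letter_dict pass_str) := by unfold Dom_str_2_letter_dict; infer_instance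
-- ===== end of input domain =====

-- B replaces A's dict-count pass + sorted-keys pass by sort-then-group-adjacent-runs (alternative algorithm, same cost, no dict).

-- ===== PORT A =====
-- the counting loop: if char in res_dict: res_dict[char] += 1 else: res_dict[char] = 1
def aCountLoop (l : List Char) : PySem.Dict Char Int :=
  l.foldl (fun d c => if d.contains c then d.insert c (d.getD c 0 + 1) else d.insert c 1)
    PySem.Dict.empty

-- for char in sorted(res_dict): ret_str += str(char) + str(res_dict[char])
-- (res_dict[char]: the key is always present, so getD is exact here)
def str_2_letter_dict (pass_str : String) : String :=
  (PySem.List.sorted (aCountLoop pass_str.toList).keys (fun x => x) false).foldl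
    (fun acc c => acc ++ String.mk [c] ++ PySem.Int.toStr ((aCountLoop pass_str.toList).getD c 0)) ""

-- ===== PORT B =====
-- the outer while loop of Source B: consume one run of equal characters per step
def bRuns : List Char → List String
  | [] => []
  | c :: rest =>
      (String.mk [c] ++ PySem.Int.toStr (1 + (rest.takeWhile (· == c)).length))
        :: bRuns (rest.dropWhile (· == c))
termination_by l => l.length
decreasing_by simpa using Nat.lt_succ_of_le (List.length_dropWhile_le _ _)

def str_2_letter_dict_alt (pass_str : String) : String :=
  String.join (bRuns (PySem.List.sorted pass_str.toList (fun x => x) false))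

-- ===== PRECONDITION & SPEC =====
def Spec_str_2_letter_dict (pass_str : String) (out : String) : Prop := out = str_2_letter_dict_alt pass_str
instance (pass_str : String) (out : String) : Decidable (Spec_str_2_letter_dict pass_str out) := by unfold Spec_str_2_letter_dict; infer_instance

-- ===== CLAIM (what is proved, stated in full; the proofs are below) =====
def Claim_equal_str_2_letter_dict : Prop := ∀ (pass_str : String), Dom_str_2_letter_dict pass_str → Spec_str_2_letter_dict pass_str (str_2_letter_dict pass_str)

-- ===== LEMMAS AND PROOFS =====

-- A's hand-written counting loop builds exactly Counter(pass_str)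
theorem aCountLoop_eq_counter (l : List Char) : aCountLoop l = PySem.Dict.counter l := by
  have hf : (fun (d : PySem.Dict Char Int) c =>
        if d.contains c then d.insert c (d.getD c 0 + 1) else d.insert c 1)
      = fun d c => d.insert c (d.getD c 0 + 1) := by
    funext d c
    by_cases h : d.contains c = true
    · simp [h]
    · have h0 : d.getD c 0 = 0 := by
        apply PySem.Dict.getD_of_not_contains
        simpa using h
      simp [h, h0]
  unfold aCountLoop
  rw [hf]
  exact PySem.Dict.foldl_insert_getD_add_one_eq_counter l

-- string folds: peeling the head off a join
theorem strFoldl_cat (l : List String) (acc : String) :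
    l.foldl (fun r s => r ++ s) acc = acc ++ l.foldl (fun r s => r ++ s) "" := by
  induction l generalizing acc with
  | nil => simp
  | cons x l ih =>
    simp only [List.foldl_cons]
    rw [ih (acc ++ x), ih ("" ++ x)]
    simp [String.append_assoc]

theorem join_cons' (x : String) (l : List String) :
    String.join (x :: l) = x ++ String.join l := by
  simp only [String.join, List.foldl_cons]
  rw [strFoldl_cat]
  simp

-- fold-append normal form of A's second loop
theorem foldl_append_join (f : Char → String) (ks : List Char) (acc : String) :
    ks.foldl (fun a c => a ++ f c) acc = acc ++ String.join (ks.map f) := by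
  induction ks generalizing acc with
  | nil => simp [String.join]
  | cons k ks ih =>
    simp only [List.map_cons, List.foldl_cons, join_cons', ih (acc ++ f k), String.append_assoc]

-- the run heads of a list (spec-side skeleton of bRuns)
def runHeads : List Char → List Char
  | [] => []
  | c :: rest => c :: runHeads (rest.dropWhile (· == c))
termination_by l => l.length
decreasing_by simpa using Nat.lt_succ_of_le (List.length_dropWhile_le _ _)

theorem mem_runHeads (xs : List Char) (y : Char) : y ∈ runHeads xs ↔ y ∈ xs := by
  induction xs using runHeads.induct with
  | case1 => simp [runHeads]
  | case2 c rest ih =>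
    rw [runHeads]
    constructor
    · intro h
      rcases List.mem_cons.1 h with h | h
      · simp [h]
      · exact List.mem_cons_of_mem _ (List.Sublist.mem (ih.1 h) (List.dropWhile_sublist _))
    · intro h
      rcases List.mem_cons.1 h with h | h
      · simp [h]
      · rw [← List.takeWhile_append_dropWhile (p := (· == c)) (l := rest)] at h
        rcases List.mem_append.1 h with h | h
        · have hyc : (y == c) = true := List.mem_takeWhile_imp (p := fun x => x == c) h
          simp [eq_of_beq hyc]
        · exact List.mem_cons_of_mem _ (ih.2 h)

theorem not_mem_dropWhile_sorted (c : Char) (rest : List Char)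
    (hp : rest.Pairwise (· ≤ ·)) (hle : ∀ y ∈ rest, c ≤ y) :
    c ∉ rest.dropWhile (· == c) := by
  induction rest with
  | nil => simp
  | cons r rs ih =>
    by_cases hr : (r == c) = true
    · rw [List.dropWhile_cons_of_pos (p := fun x => x == c) hr]
      exact ih (List.Pairwise.of_cons hp) (fun y hy => hle y (List.mem_cons_of_mem _ hy))
    · rw [List.dropWhile_cons_of_neg (p := fun x => x == c) hr]
      intro hmem
      rcases List.mem_cons.1 hmem with h | h
      · exact hr (by simp [h])
      · have h1 : r ≤ c := (List.pairwise_cons.1 hp).1 c h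
        have h2 : c ≤ r := hle r (List.mem_cons_self)
        exact hr (by simp [le_antisymm h1 h2])

theorem pairwise_lt_runHeads (xs : List Char) (h : xs.Pairwise (· ≤ ·)) :
    (runHeads xs).Pairwise (· < ·) := by
  induction xs using runHeads.induct with
  | case1 => simp [runHeads]
  | case2 c rest ih =>
    rw [runHeads]
    have hrest : rest.Pairwise (· ≤ ·) := List.Pairwise.of_cons h
    have hd : (rest.dropWhile (· == c)).Pairwise (· ≤ ·) :=
      List.Pairwise.sublist (List.dropWhile_sublist _) hrest
    refine List.pairwise_cons.2 ⟨?_, ih hd⟩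
    intro y hy
    have hyd : y ∈ rest.dropWhile (· == c) := (mem_runHeads _ y).1 hy
    have hyrest : y ∈ rest := List.Sublist.mem hyd (List.dropWhile_sublist _)
    have hle : c ≤ y := (List.pairwise_cons.1 h).1 y hyrest
    have hne : c ≠ y := by
      intro hcy
      exact not_mem_dropWhile_sorted c rest hrest ((List.pairwise_cons.1 h).1)
        (hcy ▸ hyd)
    exact lt_of_le_of_ne hle hne

theorem bRuns_eq (xs : List Char) (h : xs.Pairwise (· ≤ ·)) :
    bRuns xs
      = (runHeads xs).map (fun c => String.mk [c] ++ PySem.Int.toStr ((xs.count c : Int))) := by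
  induction xs using bRuns.induct with
  | case1 => simp [bRuns, runHeads]
  | case2 c rest ih =>
    have hrest : rest.Pairwise (· ≤ ·) := List.Pairwise.of_cons h
    have hle : ∀ y ∈ rest, c ≤ y := (List.pairwise_cons.1 h).1
    have hd : (rest.dropWhile (· == c)).Pairwise (· ≤ ·) :=
      List.Pairwise.sublist (List.dropWhile_sublist _) hrest
    have hcd : c ∉ rest.dropWhile (· == c) := not_mem_dropWhile_sorted c rest hrest hle
    have hsplit : rest.takeWhile (· == c) ++ rest.dropWhile (· == c) = rest :=
      List.takeWhile_append_dropWhile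
    have htcount : List.count c (rest.takeWhile (· == c)) = (rest.takeWhile (· == c)).length := by
      rw [List.count_eq_length]
      intro b hb
      exact (eq_of_beq (List.mem_takeWhile_imp (p := fun x => x == c) hb)).symm
    have hrc : List.count c rest = (rest.takeWhile (· == c)).length := by
      conv_lhs => rw [← hsplit]
      rw [List.count_append, htcount, List.count_eq_zero.2 hcd]
      simp
    rw [bRuns, runHeads, List.map_cons]
    congr 1
    · have hcnt : ((List.count c (c :: rest) : Int)) = 1 + (rest.takeWhile (· == c)).length := by
        rw [List.count_cons_self, hrc]
        push_cast
        ring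
      rw [hcnt]
    · rw [ih hd]
      apply List.map_congr_left
      intro y hy
      have hyd : y ∈ rest.dropWhile (· == c) := (mem_runHeads _ y).1 hy
      have hyne : y ≠ c := fun hyc => hcd (hyc ▸ hyd)
      have hyt : List.count y (rest.takeWhile (· == c)) = 0 := by
        rw [List.count_eq_zero]
        intro hmem
        exact hyne (eq_of_beq (List.mem_takeWhile_imp (p := fun x => x == c) hmem))
      have htail : List.count y (c :: rest) = List.count y (rest.dropWhile (· == c)) := by
        rw [List.count_cons]
        conv_lhs => rw [← hsplit]
        rw [List.count_append, hyt]
        simp [Ne.symm hyne]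
      rw [htail]

theorem runHeads_sorted_eq (l : List Char) :
    PySem.List.sorted (PySem.Set.ofList l) (fun x => x) false
      = runHeads (PySem.List.sorted l (fun x => x) false) := by
  have hpair : (PySem.List.sorted l (fun x => x) false).Pairwise (· ≤ ·) := by
    simpa using PySem.List.sorted_pairwise l (fun x => x)
  have hlt : (runHeads (PySem.List.sorted l (fun x => x) false)).Pairwise (· < ·) :=
    pairwise_lt_runHeads _ hpair
  apply PySem.List.sorted_eq_of_perm_of_pairwise_lt
  · have h1 : (runHeads (PySem.List.sorted l (fun x => x) false)).Nodup :=
      hlt.imp (fun h => ne_of_lt h)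
    rw [List.perm_ext_iff_of_nodup h1 (PySem.Set.nodup_ofList l)]
    intro a
    rw [mem_runHeads, PySem.List.mem_sorted, PySem.Set.mem_ofList]
  · exact hlt

-- ===== VERDICT (by name: the statement is the Claim_ definition above) =====
theorem str_2_letter_dict_spec : Claim_equal_str_2_letter_dict := by
  intro s _
  unfold Spec_str_2_letter_dict str_2_letter_dict str_2_letter_dict_alt
  have hperm : (PySem.List.sorted s.toList (fun x => x) false).Perm s.toList :=
    PySem.List.sorted_perm s.toList _ _
  have hpair : (PySem.List.sorted s.toList (fun x => x) false).Pairwise (· ≤ ·) := by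
    simpa using PySem.List.sorted_pairwise s.toList (fun x => x)
  rw [aCountLoop_eq_counter, PySem.Dict.keys_counter]
  simp only [PySem.Dict.getD_counter, String.append_assoc]
  rw [foldl_append_join (fun c => String.mk [c] ++ PySem.Int.toStr ((s.toList.count c : Int))),
    runHeads_sorted_eq, bRuns_eq _ hpair]
  simp only [String.empty_append]
  congr 1
  apply List.map_congr_left
  intro c _
  rw [hperm.count_eq]
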